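-- pv_equiv track=rewrite | github.com/mlockwood/bioinformatics | class_II/string_composition.py | string_composition
-- ===== SOURCE A (Python) =====
-- def string_composition(k, text):
--     """
--     Produce a set of all k-mer nucleotide sequences in the text.
--     :param k: length of nucleotide strings
--     :param text: genome text
--     :return: a set of all k-mer nucleotides for the text
--     """
--     kmers = {}
--     i = 0
--     k = int(k)
--     while i <= (len(text) - k):
--         kmers[text[i:i+k]] = True
--         i += 1
--     return '\n'.join(sorted(list(kmers.keys())))
-- ===== SOURCE B (Python) =====
-- def string_composition(k, text):
--     """Sort all k-mers (with duplicates), then collapse adjacent duplicates; no set/dict."""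
--     k = int(k)
--     if k <= 0:
--         return ''
--     kmers = sorted(text[i:i + k] for i in range(len(text) - k + 1))
--     out = []
--     prev = None
--     for m in kmers:
--         if prev != m:
--             out.append(m)
--             prev = m
--     return '\n'.join(out)
-- ===== Notes on version B (the rewrite author's own statement) =====
-- stated objective: alternative
-- what changed: Hash-based dedup via a dict of k-mers is replaced by sorting the full duplicate-containing k-mer list and collapsing adjacent duplicates in one pass, with no set/dict; non-positive k yields no k-mers.
-- intended difference: For k < 0 with len(text) + k > 0, Python's negative slice bound makes A's text[i:i+k] wrap around and A returns newline-joined windows of length len(text)+k (e.g. '\na' for k=-1, text='ab'); B returns '' because there are no k-mers of non-positive length, which is the intended reading of 'all k-mer strings of length k'. — e.g. on string_composition(-1, "ab"): A returns "\na", B returns ""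
import Mathlib
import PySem

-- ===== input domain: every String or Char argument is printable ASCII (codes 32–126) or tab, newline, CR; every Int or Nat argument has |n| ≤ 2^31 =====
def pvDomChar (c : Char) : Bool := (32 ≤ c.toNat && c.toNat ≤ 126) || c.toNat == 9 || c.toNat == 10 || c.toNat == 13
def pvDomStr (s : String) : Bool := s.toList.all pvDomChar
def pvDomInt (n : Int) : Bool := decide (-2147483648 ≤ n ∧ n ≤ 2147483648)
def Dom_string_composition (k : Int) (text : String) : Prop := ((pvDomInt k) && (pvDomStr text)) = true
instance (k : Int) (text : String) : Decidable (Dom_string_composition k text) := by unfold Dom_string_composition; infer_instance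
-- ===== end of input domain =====

-- B replaces A's dict-based dedup of k-mers by sort-then-adjacent-collapse; for k ≤ 0 B returns '' (no k-mers), see D_ below.

-- ===== PORT A =====
-- the 'while i <= len(text) - k' loop, inserting text[i:i+k] into the dict
def scALoop (cs : List Char) (k : Int) (i : Int) (d : PySem.Dict String Bool) : PySem.Dict String Bool :=
  if i ≤ (cs.length : Int) - k then
    scALoop cs k (i + 1) (d.insert (String.ofList (PySem.List.slice cs (some i) (some (i + k)))) true)
  else d
termination_by ((cs.length : Int) - k + 1 - i).toNat
decreasing_by omega

def string_composition (k : Int) (text : String) : String :=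
  let kmers := scALoop text.toList k 0 PySem.Dict.empty
  PySem.Str.join "\n" (PySem.List.sorted kmers.keys (fun x => x) false)

-- ===== PORT B =====
def string_composition_alt (k : Int) (text : String) : String :=
  if k ≤ 0 then "" else
  let cs := text.toList
  let kmers := PySem.List.sorted
    ((PySem.List.pyRange 0 ((cs.length : Int) - k + 1) 1).map
      (fun i => String.ofList (PySem.List.slice cs (some i) (some (i + k))))) (fun x => x) false
  let st := kmers.foldl
    (fun (st : List String × Option String) m =>
      if st.2 ≠ some m then (st.1 ++ [m], some m) else st)
    ([], none)
  PySem.Str.join "\n" st.1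

-- ===== PRECONDITION & SPEC =====
-- For k < 0 with len(text) + k > 0, Python's negative slice bound makes A's text[i:i+k] wrap around and A returns
-- newline-joined windows of length len(text)+k; B returns '' because there are no k-mers of non-positive length,
-- which is the intended reading of 'all k-mer strings of length k'.
def D_string_composition (k : Int) (text : String) : Prop :=
  k < 0 ∧ 0 < (text.toList.length : Int) + k
instance (k : Int) (text : String) : Decidable (D_string_composition k text) := by unfold D_string_composition; infer_instance

def Spec_string_composition (k : Int) (text : String) (out : String) : Prop :=
  ¬ D_string_composition k text → out = string_composition_alt k text
instance (k : Int) (text : String) (out : String) : Decidable (Spec_string_composition k text out) := by unfold Spec_string_composition; infer_instance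

def pvDiffWitness_string_composition : Int × String := (-1, "ab")
def pvDiffWitnessOut_string_composition : String × String := ("\na", "")

-- ===== CLAIM (what is proved, stated in full; the proofs are below) =====
def Claim_unchanged_string_composition : Prop := ∀ (k : Int) (text : String), Dom_string_composition k text → Spec_string_composition k text (string_composition k text)
def Claim_changed_string_composition : Prop := Dom_string_composition (pvDiffWitness_string_composition.1) (pvDiffWitness_string_composition.2) ∧ D_string_composition (pvDiffWitness_string_composition.1) (pvDiffWitness_string_composition.2) ∧ string_composition (pvDiffWitness_string_composition.1) (pvDiffWitness_string_composition.2) = pvDiffWitnessOut_string_composition.1 ∧ string_composition_alt (pvDiffWitness_string_composition.1) (pvDiffWitness_string_composition.2) = pvDiffWitnessOut_string_composition.2 ∧ pvDiffWitnessOut_string_composition.1 ≠ pvDiffWitnessOut_string_composition.2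

-- ===== LEMMAS AND PROOFS =====

-- the recursive shape of B's adjacent-collapse fold
def scCollapse (prev : Option String) : List String → List String
  | [] => []
  | x :: t => if prev = some x then scCollapse prev t else x :: scCollapse (some x) t

lemma scFoldl_eq_collapse (l : List String) (acc : List String) (prev : Option String) :
    (l.foldl (fun (st : List String × Option String) m =>
        if st.2 ≠ some m then (st.1 ++ [m], some m) else st) (acc, prev)).1
      = acc ++ scCollapse prev l := by
  induction l generalizing acc prev with
  | nil => simp [scCollapse]
  | cons x t ih =>
    rw [List.foldl_cons]
    by_cases h : prev = some x
    · rw [if_neg (by simp [h]), scCollapse, if_pos h]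
      exact ih acc prev
    · rw [if_pos h, scCollapse, if_neg h, ih]
      simp

-- on a ≤-sorted list whose elements all exceed p, collapsing after prev = some p
-- keeps exactly the elements ≠ p, strictly increasing and all > p
lemma scCollapse_some (l : List String) (hs : l.Pairwise (· ≤ ·)) (p : String)
    (hp : ∀ x ∈ l, p ≤ x) :
    (∀ x, x ∈ scCollapse (some p) l ↔ (x ∈ l ∧ x ≠ p)) ∧
    (scCollapse (some p) l).Pairwise (· < ·) ∧
    (∀ x ∈ scCollapse (some p) l, p < x) := by
  induction l generalizing p with
  | nil => simp [scCollapse]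
  | cons y t ih =>
    rcases List.pairwise_cons.mp hs with ⟨hyt, hst⟩
    by_cases h : y = p
    · subst h
      rcases ih hst y hyt with ⟨hmem, hpw, hgt⟩
      have heq : scCollapse (some y) (y :: t) = scCollapse (some y) t := by
        simp [scCollapse]
      rw [heq]
      refine ⟨?_, hpw, hgt⟩
      intro x
      rw [hmem]
      constructor
      · rintro ⟨hx, hne⟩; exact ⟨List.mem_cons_of_mem _ hx, hne⟩
      · rintro ⟨hx, hne⟩
        rcases List.mem_cons.mp hx with rfl | hx
        · exact absurd rfl hne
        · exact ⟨hx, hne⟩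
    · have hpy : p < y := lt_of_le_of_ne (hp y List.mem_cons_self) (fun e => h e.symm)
      have heq : scCollapse (some p) (y :: t) = y :: scCollapse (some y) t := by
        simp only [scCollapse]
        rw [if_neg (fun e => h (Option.some.inj e).symm)]
      rw [heq]
      rcases ih hst y hyt with ⟨hmem, hpw, hgt⟩
      refine ⟨?_, ?_, ?_⟩
      · intro x
        constructor
        · intro hx
          rcases List.mem_cons.mp hx with rfl | hx
          · exact ⟨List.mem_cons_self, fun e => h e⟩
          · rcases (hmem x).mp hx with ⟨hxt, _⟩
            exact ⟨List.mem_cons_of_mem _ hxt, ne_of_gt (lt_trans hpy (hgt x hx))⟩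
        · rintro ⟨hx, hne⟩
          rcases List.mem_cons.mp hx with rfl | hx
          · exact List.mem_cons_self
          · by_cases hxy : x = y
            · subst hxy; exact List.mem_cons_self
            · exact List.mem_cons_of_mem _ ((hmem x).mpr ⟨hx, hxy⟩)
      · exact List.pairwise_cons.mpr ⟨fun x hx => hgt x hx, hpw⟩
      · intro x hx
        rcases List.mem_cons.mp hx with rfl | hx
        · exact hpy
        · exact lt_trans hpy (hgt x hx)

lemma scCollapse_none (l : List String) (hs : l.Pairwise (· ≤ ·)) :
    (∀ x, x ∈ scCollapse none l ↔ x ∈ l) ∧ (scCollapse none l).Pairwise (· < ·) := by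
  cases l with
  | nil => simp [scCollapse]
  | cons y t =>
    rcases List.pairwise_cons.mp hs with ⟨hyt, hst⟩
    have heq : scCollapse none (y :: t) = y :: scCollapse (some y) t := by simp [scCollapse]
    rw [heq]
    rcases scCollapse_some t hst y hyt with ⟨hmem, hpw, hgt⟩
    refine ⟨?_, List.pairwise_cons.mpr ⟨fun x hx => hgt x hx, hpw⟩⟩
    intro x
    simp only [List.mem_cons, hmem]
    constructor
    · rintro (rfl | ⟨hx, _⟩)
      · exact Or.inl rfl
      · exact Or.inr hx
    · rintro (rfl | hx)
      · exact Or.inl rfl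
      · by_cases hxy : x = y
        · exact Or.inl hxy
        · exact Or.inr ⟨hx, hxy⟩

-- sorted distinct elements: sorting the dedup equals collapsing the full sorted list
lemma sc_sorted_dedup_eq_collapse (ms : List String) :
    PySem.List.sorted (PySem.List.dedup ms) (fun x => x) false
      = scCollapse none (PySem.List.sorted ms (fun x => x) false) := by
  have hs : (PySem.List.sorted ms (fun x => x) false).Pairwise (· ≤ ·) :=
    PySem.List.sorted_pairwise ms (fun x => x)
  rcases scCollapse_none _ hs with ⟨hmem, hpw⟩
  apply PySem.List.sorted_eq_of_perm_of_pairwise_lt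
  · have hnd1 : (scCollapse none (PySem.List.sorted ms (fun x => x) false)).Nodup :=
      hpw.imp (fun h => ne_of_lt h)
    have hnd2 : (PySem.List.dedup ms).Nodup := PySem.List.nodup_dedup ms
    rw [List.perm_ext_iff_of_nodup hnd1 hnd2]
    intro x
    rw [hmem, PySem.List.mem_sorted, PySem.List.mem_dedup]
  · exact hpw

-- A's while loop is the insert-fold over the list of slices
lemma scALoop_eq_foldl (cs : List Char) (k : Int) (i : Int) (d : PySem.Dict String Bool) :
    scALoop cs k i d
      = ((PySem.List.pyRange i ((cs.length : Int) - k + 1) 1).map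
          (fun j => String.ofList (PySem.List.slice cs (some j) (some (j + k))))).foldl
          (fun d s => d.insert s true) d := by
  rw [scALoop]
  by_cases h : i ≤ (cs.length : Int) - k
  · rw [if_pos h, PySem.List.pyRange_one_cons (by omega), List.map_cons, List.foldl_cons]
    exact scALoop_eq_foldl cs k (i + 1) _
  · rw [if_neg h, PySem.List.pyRange_one_eq_nil (by omega)]
    simp
termination_by ((cs.length : Int) - k + 1 - i).toNat
decreasing_by omega

-- the dict-empty keys update is the ordered dedup
lemma sc_update_empty (l : List String) :
    PySem.Set.update (PySem.Dict.empty : PySem.Dict String Bool).keys l = PySem.List.dedup l := by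
  rw [PySem.List.dedup_eq_ofList]; rfl

-- when k ≤ 0 and there is no wraparound window, every slice text[i:i+k] is empty
lemma scSlice_empty (xs : List Char) (i k : Int) (h0 : 0 ≤ i) (hk : k ≤ 0)
    (h : k = 0 ∨ (xs.length : Int) + k ≤ 0) :
    PySem.List.slice xs (some i) (some (i + k)) = [] := by
  simp only [PySem.List.slice, PySem.List.clampIdx]
  split_ifs <;> (rw [List.take_eq_nil_iff]; left; omega)

-- a constant nonempty list dedups to the singleton
lemma scFoldl_add_const (t : List String) (c : String) (s : PySem.Set String)
    (hc : c ∈ s) (h : ∀ x ∈ t, x = c) : t.foldl PySem.Set.add s = s := by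
  induction t with
  | nil => rfl
  | cons y r ih =>
    have hy : y = c := h y List.mem_cons_self
    subst hy
    rw [List.foldl_cons, PySem.Set.add, if_pos (by simpa [PySem.Set.contains] using hc)]
    exact ih (fun x hx => h x (List.mem_cons_of_mem _ hx))

lemma scDedup_const (t : List String) (c : String) (h : ∀ x ∈ t, x = c) :
    PySem.List.dedup (c :: t) = [c] := by
  rw [PySem.List.dedup_eq_ofList, PySem.Set.ofList_eq_foldl, List.foldl_cons]
  have h1 : PySem.Set.add ([] : PySem.Set String) c = [c] := rfl
  rw [h1]
  exact scFoldl_add_const t c [c] List.mem_cons_self h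

lemma sc_sorted_singleton (c : String) : PySem.List.sorted [c] (fun x => x) false = [c] :=
  PySem.List.sorted_id_eq_of_perm_of_pairwise _ _ (List.Perm.refl _) (by simp)

lemma sc_join_empty : PySem.Str.join "\n" [""] = "" := by
  apply String.toList_injective
  simp only [PySem.Str.toList_join]
  decide

-- A returns '' whenever all its slices are empty (k = 0, or k < 0 with no wraparound window)
lemma scA_empty (k : Int) (text : String) (hk : k ≤ 0)
    (h : k = 0 ∨ (text.toList.length : Int) + k ≤ 0) :
    string_composition k text = "" := by
  unfold string_composition
  rw [scALoop_eq_foldl]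
  simp only [PySem.Dict.keys_foldl_insert, sc_update_empty]
  have hlt : (0 : Int) < (text.toList.length : Int) - k + 1 := by omega
  rw [PySem.List.pyRange_one_cons hlt, List.map_cons]
  have hz : String.ofList (PySem.List.slice text.toList (some 0) (some (0 + k))) = "" := by
    rw [scSlice_empty text.toList 0 k le_rfl hk h]
  rw [hz]
  have hall : ∀ x ∈ (PySem.List.pyRange (0 + 1) ((text.toList.length : Int) - k + 1) 1).map
      (fun j => String.ofList (PySem.List.slice text.toList (some j) (some (j + k)))), x = "" := by
    intro x hx
    rcases List.mem_map.mp hx with ⟨j, hj, rfl⟩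
    have hj0 : 0 + 1 ≤ j := (PySem.List.mem_pyRange_one.mp hj).1
    rw [scSlice_empty text.toList j k (by omega) hk h]
  rw [scDedup_const _ "" hall, sc_sorted_singleton, sc_join_empty]

-- ===== VERDICT (by name: the statement is the Claim_ definition above) =====
theorem string_composition_spec : Claim_unchanged_string_composition := by
  intro k text _
  unfold Spec_string_composition
  intro hnd
  by_cases hk : k ≤ 0
  · have h : k = 0 ∨ (text.toList.length : Int) + k ≤ 0 := by
      unfold D_string_composition at hnd; omega
    rw [scA_empty k text hk h]
    unfold string_composition_alt
    rw [if_pos hk]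
  · unfold string_composition string_composition_alt
    rw [if_neg hk, scALoop_eq_foldl]
    simp only [PySem.Dict.keys_foldl_insert, sc_update_empty, sc_sorted_dedup_eq_collapse,
      scFoldl_eq_collapse, List.nil_append]

theorem string_composition_changed : Claim_changed_string_composition := by
  unfold Claim_changed_string_composition
  have hA : string_composition (-1) "ab" = "\na" := by
    unfold string_composition
    rw [scALoop_eq_foldl]
    show PySem.Str.join "\n" (PySem.List.sorted
      (((PySem.List.pyRange 0 ((("ab".toList.length : Int)) - -1 + 1) 1).map
        (fun j => String.ofList (PySem.List.slice "ab".toList (some j) (some (j + -1))))).foldl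
        (fun d s => d.insert s true) PySem.Dict.empty).keys (fun x => x) false) = "\na"
    have hkeys : (((PySem.List.pyRange 0 ((("ab".toList.length : Int)) - -1 + 1) 1).map
        (fun j => String.ofList (PySem.List.slice "ab".toList (some j) (some (j + -1))))).foldl
        (fun d s => d.insert s true) PySem.Dict.empty).keys = ["a", ""] := by decide
    rw [hkeys]
    have hsort : PySem.List.sorted ["a", ""] (fun x => x) false = ["", "a"] :=
      PySem.List.sorted_id_eq_of_perm_of_pairwise _ _ (List.Perm.swap "a" "" []) (by simp; decide)
    rw [hsort]
    apply String.toList_injective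
    simp only [PySem.Str.toList_join]
    decide
  exact ⟨by decide, by decide, hA, by decide, by decide⟩
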